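-- pv_equiv track=rewrite | github.com/jpuigcerver/PyLaia | laia/utils/char_to_word_seq.py | char_to_word_seq
-- ===== SOURCE A (Python) =====
-- from typing import Iterable, List
--
-- def char_to_word_seq(
--     sequence_of_characters: Iterable, delimiters: Iterable
-- ) -> List[List]:
--     """Convert a sequence of characters into a sequence of words.
--
--     Examples:
--         >>> char_to_word_seq(' hello my  friend ', [' '])
--         [['h', 'e', 'l', 'l', 'o'], ['m', 'y'], ['f', 'r', 'i', 'e', 'n', 'd']]
--         >>> char_to_word_seq([-2, 1, 2, 3, -1, 1, 2, -2, 3], [-1, -2])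
--         [[1, 2, 3], [1, 2], [3]]
--
--     Args:
--         sequence_of_characters (iterable): A list of symbols representing the
--             characters in a sentence.
--         delimiters (iterable): A set of symbols representing the word
--             delimiters. Any sequence of characters
--
--     Returns:
--         A list of lists containing the characters that form each word.
--         Delimiters are not included.
--     """
--     delimiter_set = set(delimiters)
--     word_seq = [[]]  # type: List[List]
--     prev_is_delim = True
--     for c in sequence_of_characters:
--         if c in delimiter_set:
--             if not prev_is_delim:
--                 word_seq.append([])
--             prev_is_delim = True
--         else:
--             word_seq[-1].append(c)
--             prev_is_delim = False
--     if not word_seq[-1]: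
--         word_seq = word_seq[:-1]
--     return word_seq
-- ===== SOURCE B (Python) =====
-- from itertools import groupby
-- from typing import Iterable, List
--
--
-- def char_to_word_seq(
--     sequence_of_characters: Iterable, delimiters: Iterable
-- ) -> List[List]:
--     """Split the sequence into words: maximal runs of non-delimiter symbols."""
--     delimiter_set = set(delimiters)
--     return [
--         list(group)
--         for is_delim, group in groupby(sequence_of_characters, key=lambda c: c in delimiter_set)
--         if not is_delim
--     ]
-- ===== Notes on version B (the rewrite author's own statement) =====
-- stated objective: idiomatic
-- what changed: Replaces A's prev_is_delim flag with append-to-last/append-empty/trim-trailing-empty bookkeeping by an itertools.groupby split into maximal runs keyed on delimiter membership, emitting only non-delimiter runs.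
import Mathlib
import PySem

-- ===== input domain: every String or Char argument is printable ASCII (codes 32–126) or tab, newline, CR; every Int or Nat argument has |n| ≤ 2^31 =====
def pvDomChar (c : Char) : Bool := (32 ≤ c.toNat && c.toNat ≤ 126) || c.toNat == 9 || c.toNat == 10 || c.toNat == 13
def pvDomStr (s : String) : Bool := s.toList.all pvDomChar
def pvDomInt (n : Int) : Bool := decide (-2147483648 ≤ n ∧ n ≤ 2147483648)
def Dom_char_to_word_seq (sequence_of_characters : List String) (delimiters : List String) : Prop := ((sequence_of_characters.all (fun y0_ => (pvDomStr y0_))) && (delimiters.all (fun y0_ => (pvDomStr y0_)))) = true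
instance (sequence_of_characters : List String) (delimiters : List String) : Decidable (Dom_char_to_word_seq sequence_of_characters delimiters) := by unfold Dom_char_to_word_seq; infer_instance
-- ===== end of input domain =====

-- B replaces A's flag/append-empty/trim bookkeeping by a groupby-style split into
-- maximal non-delimiter runs (objective: idiomatic); same results on all inputs.

-- ===== PORT A =====
-- word_seq[-1].append(c): rewrite the last list of word_seq (word_seq is always nonempty)
def pvAppendLast (ws : List (List String)) (c : String) : List (List String) :=
  ws.dropLast ++ [ws.getLastD [] ++ [c]]

-- the 'for c in sequence_of_characters' loop over the state (word_seq, prev_is_delim)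
def pvLoopA (ds : PySem.Set String) : List String → List (List String) → Bool → List (List String)
  | [], ws, _ => ws
  | c :: cs, ws, pd =>
    if PySem.Set.contains ds c then
      pvLoopA ds cs (if pd then ws else ws ++ [[]]) true
    else
      pvLoopA ds cs (pvAppendLast ws c) false

def char_to_word_seq (sequence_of_characters : List String) (delimiters : List String) : List (List String) :=
  let delimiter_set := PySem.Set.ofList delimiters
  let word_seq := pvLoopA delimiter_set sequence_of_characters [[]] true
  if word_seq.getLastD [] = [] then word_seq.dropLast else word_seq

-- ===== PORT B =====
-- groupby(key = c in delimiter_set): skip delimiter runs, emit each non-delimiter run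
def pvLoopB (ds : PySem.Set String) : List String → List (List String)
  | [] => []
  | c :: cs =>
    if PySem.Set.contains ds c then pvLoopB ds cs
    else (c :: cs.takeWhile (fun x => !PySem.Set.contains ds x)) ::
         pvLoopB ds (cs.dropWhile (fun x => !PySem.Set.contains ds x))
termination_by cs => cs.length
decreasing_by
  · simp
  · simpa using Nat.lt_succ_of_le (List.length_dropWhile_le _ cs)

def char_to_word_seq_alt (sequence_of_characters : List String) (delimiters : List String) : List (List String) :=
  pvLoopB (PySem.Set.ofList delimiters) sequence_of_characters

-- ===== PRECONDITION & SPEC =====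
def Spec_char_to_word_seq (sequence_of_characters : List String) (delimiters : List String) (out : List (List String)) : Prop := out = char_to_word_seq_alt sequence_of_characters delimiters
instance (sequence_of_characters : List String) (delimiters : List String) (out : List (List String)) : Decidable (Spec_char_to_word_seq sequence_of_characters delimiters out) := by unfold Spec_char_to_word_seq; infer_instance

-- ===== CLAIM (what is proved, stated in full; the proofs are below) =====
def Claim_equal_char_to_word_seq : Prop := ∀ (sequence_of_characters : List String) (delimiters : List String), Dom_char_to_word_seq sequence_of_characters delimiters → Spec_char_to_word_seq sequence_of_characters delimiters (char_to_word_seq sequence_of_characters delimiters)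

-- ===== LEMMAS AND PROOFS =====

-- A's final trimming step, as a function (used only by the proofs)
def pvTrim (ws : List (List String)) : List (List String) :=
  if ws.getLastD [] = [] then ws.dropLast else ws

theorem getLastD_append_of_ne_nil (done ws : List (List String)) (h : ws ≠ []) :
    (done ++ ws).getLastD [] = ws.getLastD [] := by
  rw [List.getLastD_eq_getLast?, List.getLastD_eq_getLast?, List.getLast?_append_of_ne_nil done h]

theorem pvTrim_append (done ws : List (List String)) (h : ws ≠ []) :
    pvTrim (done ++ ws) = done ++ pvTrim ws := by
  simp only [pvTrim, getLastD_append_of_ne_nil done ws h,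
    List.dropLast_append_of_ne_nil h]
  split <;> rfl

theorem pvAppendLast_ne_nil (ws : List (List String)) (c : String) :
    pvAppendLast ws c ≠ [] := by simp [pvAppendLast]

theorem pvLoopA_ne_nil (ds : PySem.Set String) (cs : List String)
    (ws : List (List String)) (pd : Bool) (h : ws ≠ []) :
    pvLoopA ds cs ws pd ≠ [] := by
  induction cs generalizing ws pd with
  | nil => simpa [pvLoopA] using h
  | cons c cs ih =>
    simp only [pvLoopA]
    split
    · apply ih
      split
      · exact h
      · simp
    · exact ih _ _ (pvAppendLast_ne_nil ws c)

theorem pvAppendLast_append (done ws : List (List String)) (c : String) (h : ws ≠ []) :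
    pvAppendLast (done ++ ws) c = done ++ pvAppendLast ws c := by
  simp only [pvAppendLast, getLastD_append_of_ne_nil done ws h,
    List.dropLast_append_of_ne_nil h, List.append_assoc]

theorem pvLoopA_append (ds : PySem.Set String) (cs : List String)
    (done ws : List (List String)) (pd : Bool) (h : ws ≠ []) :
    pvLoopA ds cs (done ++ ws) pd = done ++ pvLoopA ds cs ws pd := by
  induction cs generalizing ws pd with
  | nil => simp [pvLoopA]
  | cons c cs ih =>
    by_cases hd : c ∈ ds
    · cases pd with
      | true => simpa [pvLoopA, hd] using ih ws true h
      | false => simpa [pvLoopA, hd, List.append_assoc] using ih (ws ++ [[]]) true (by simp)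
    · have e := pvAppendLast_append done ws c h
      simpa [pvLoopA, hd, e] using ih (pvAppendLast ws c) false (pvAppendLast_ne_nil ws c)

-- the joint invariant: A's loop-and-trim equals B's run splitting, from either of the
-- two reachable state shapes (fresh after a delimiter / inside the current word acc)
theorem pvMain (ds : PySem.Set String) :
    ∀ n (cs : List String), cs.length ≤ n →
      (pvTrim (pvLoopA ds cs [[]] true) = pvLoopB ds cs) ∧
      (∀ acc : List String, acc ≠ [] →
        pvTrim (pvLoopA ds cs [acc] false) =
          (acc ++ cs.takeWhile (fun x => !PySem.Set.contains ds x)) ::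
            pvLoopB ds (cs.dropWhile (fun x => !PySem.Set.contains ds x))) := by
  intro n
  induction n with
  | zero =>
    intro cs hcs
    have : cs = [] := List.eq_nil_of_length_eq_zero (Nat.le_zero.mp hcs)
    subst this
    exact ⟨by simp [pvLoopA, pvLoopB, pvTrim], fun acc hacc => by
      simp [pvLoopA, pvLoopB, pvTrim, hacc]⟩
  | succ n ih =>
    intro cs hcs
    cases cs with
    | nil =>
      exact ⟨by simp [pvLoopA, pvLoopB, pvTrim], fun acc hacc => by
        simp [pvLoopA, pvLoopB, pvTrim, hacc]⟩
    | cons c cs' =>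
      have hlen : cs'.length ≤ n := by simpa using hcs
      by_cases hd : c ∈ ds
      · constructor
        · -- fresh state, delimiter head: state unchanged
          simpa [pvLoopA, pvLoopB, hd] using (ih cs' hlen).1
        · -- in-word state, delimiter head: the word acc is closed off
          intro acc hacc
          have e1 : pvLoopA ds cs' [acc, []] true = [acc] ++ pvLoopA ds cs' [[]] true :=
            pvLoopA_append ds cs' [acc] [[]] true (by simp)
          have e2 : pvTrim (acc :: pvLoopA ds cs' [[]] true) =
              acc :: pvTrim (pvLoopA ds cs' [[]] true) :=
            pvTrim_append [acc] _ (pvLoopA_ne_nil ds cs' [[]] true (by simp))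
          simp [pvLoopA, pvLoopB, hd, e1, e2, (ih cs' hlen).1]
      · constructor
        · -- fresh state, non-delimiter head: a new word [c] starts
          have e : pvAppendLast [[]] c = [[c]] := rfl
          have := (ih cs' hlen).2 [c] (by simp)
          simp [pvLoopA, pvLoopB, hd, e] at this ⊢
          exact this
        · -- in-word state, non-delimiter head: c joins acc
          intro acc hacc
          have e : pvAppendLast [acc] c = [acc ++ [c]] := by simp [pvAppendLast]
          have := (ih cs' hlen).2 (acc ++ [c]) (by simp)
          simp [pvLoopA, hd, e] at this ⊢
          exact this

-- ===== VERDICT (by name: the statement is the Claim_ definition above) =====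
theorem char_to_word_seq_spec : Claim_equal_char_to_word_seq := by
  intro seq ds _
  show char_to_word_seq seq ds = char_to_word_seq_alt seq ds
  have := (pvMain (PySem.Set.ofList ds) seq.length seq le_rfl).1
  simpa [char_to_word_seq, char_to_word_seq_alt, pvTrim] using this
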